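-- pv_equiv track=rewrite | github.com/Rotlug/autoplant | main.py | auto_indent
-- ===== SOURCE A (Python) =====
-- def auto_indent(string: str):
--     indent = 0
--     new_string = ""
--     for line in string.split("\n"):
--         line = line.strip()
--         if line.endswith("}"):
--             indent -= 1
--
--         line = "\t"*indent + line
--
--         if line.endswith("{"):
--             indent += 1
--
--         new_string += line + "\n"
--
--     return new_string
-- ===== SOURCE B (Python) =====
-- def auto_indent(string: str):
--     # two-pass: build stripped lines + delta/closer tables, prefix-sum the
--     # depths, then format every line independently and join once
--     lines = [l.strip() for l in string.split("\n")]
--     closer = [l.endswith("}") for l in lines]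
--     delta = [l.endswith("{") - c for l, c in zip(lines, closer)]
--     depths = []
--     d = 0
--     for x in delta:
--         depths.append(d)
--         d += x
--     return "".join("\t" * (d - c) + l + "\n" for d, c, l in zip(depths, closer, lines))
-- ===== Notes on version B (the rewrite author's own statement) =====
-- stated objective: alternative
-- what changed: A's single interleaved loop carrying a running indent and a growing output string is replaced by a table-then-format two-pass: strip all lines, tabulate per-line closer flags and depth deltas, prefix-sum the deltas into before-line depths, then format each line independently and join once.
import Mathlib
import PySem

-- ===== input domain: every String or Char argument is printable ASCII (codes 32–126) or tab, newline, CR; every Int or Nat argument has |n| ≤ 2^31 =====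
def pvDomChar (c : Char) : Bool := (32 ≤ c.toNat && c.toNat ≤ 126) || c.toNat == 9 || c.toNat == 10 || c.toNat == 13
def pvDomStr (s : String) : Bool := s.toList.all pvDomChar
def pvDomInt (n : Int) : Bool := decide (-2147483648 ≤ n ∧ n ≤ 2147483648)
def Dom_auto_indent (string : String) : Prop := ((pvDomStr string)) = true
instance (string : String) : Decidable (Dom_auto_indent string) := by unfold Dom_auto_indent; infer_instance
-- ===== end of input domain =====

-- B replaces A's single interleaved indent-accumulator loop by a table-then-format
-- two-pass decomposition (strip/closer/delta tables, prefix-summed depths, one join);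
-- objective: alternative (same cost, different structure).

-- ===== PORT A =====
def auto_indent (string : String) : String :=
  let r := (PySem.Chars.splitOn string.toList ['\n']).foldl
    (fun (s : Int × List Char) line =>
      let line := PySem.Chars.strip line
      let indent := if PySem.Chars.endswith line ['}'] then s.1 - 1 else s.1
      let line := PySem.List.pyRepeat ['\t'] indent ++ line
      let indent := if PySem.Chars.endswith line ['{'] then indent + 1 else indent
      (indent, s.2 ++ line ++ ['\n'])) ((0 : Int), ([] : List Char))
  String.mk r.2

-- ===== PORT B =====
def auto_indent_alt (string : String) : String :=
  let lines := (PySem.Chars.splitOn string.toList ['\n']).map PySem.Chars.strip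
  let closer := lines.map (fun l => PySem.Chars.endswith l ['}'])
  let delta := (lines.zip closer).map
    (fun p => (if PySem.Chars.endswith p.1 ['{'] then (1 : Int) else 0) - (if p.2 then 1 else 0))
  let depths := (delta.foldl (fun (s : List Int × Int) x => (s.1 ++ [s.2], s.2 + x))
    (([] : List Int), (0 : Int))).1
  String.mk (PySem.Chars.join []
    (((depths.zip closer).zip lines).map
      (fun t => PySem.List.pyRepeat ['\t'] (t.1.1 - (if t.1.2 then 1 else 0)) ++ t.2 ++ ['\n'])))

-- ===== PRECONDITION & SPEC =====
def Spec_auto_indent (string : String) (out : String) : Prop := out = auto_indent_alt string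
instance (string : String) (out : String) : Decidable (Spec_auto_indent string out) := by unfold Spec_auto_indent; infer_instance

-- ===== CLAIM (what is proved, stated in full; the proofs are below) =====
def Claim_equal_auto_indent : Prop := ∀ (string : String), Dom_auto_indent string → Spec_auto_indent string (auto_indent string)

-- ===== LEMMAS AND PROOFS =====

-- per-line depth change (on the stripped line)
def pvDelta (l : List Char) : Int :=
  (if PySem.Chars.endswith l ['{'] then 1 else 0) - (if PySem.Chars.endswith l ['}'] then 1 else 0)

-- the indented rendering of a list of (already stripped) lines from depth n
def pvRender : List (List Char) → Int → List Char
  | [], _ => []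
  | l :: ls, n =>
    PySem.List.pyRepeat ['\t'] (n - (if PySem.Chars.endswith l ['}'] then 1 else 0)) ++ l ++ ['\n']
      ++ pvRender ls (n + pvDelta l)

-- the running depths before each line
def pvDepths : List Int → Int → List Int
  | [], _ => []
  | x :: xs, n => n :: pvDepths xs (n + x)

theorem pv_singleton_suffix_concat (a c : Char) (w : List Char) : [a] <:+ w ++ [c] ↔ a = c := by
  constructor
  · intro h
    rcases h with ⟨t, ht⟩
    have := congrArg List.getLast? ht
    simp at this
    exact this
  · rintro rfl
    exact ⟨w, rfl⟩

-- prepending tabs does not change whether a line ends with '{'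
theorem pv_endswith_tabs (k : Int) (l : List Char) :
    PySem.Chars.endswith (PySem.List.pyRepeat ['\t'] k ++ l) ['{'] =
      PySem.Chars.endswith l ['{'] := by
  rw [Bool.eq_iff_iff, PySem.Chars.endswith_iff, PySem.Chars.endswith_iff,
    PySem.List.pyRepeat_singleton]
  rcases List.eq_nil_or_concat l with h | ⟨w, c, h⟩
  · subst h
    simp only [List.append_nil, List.suffix_nil]
    constructor
    · intro h
      have hm : '{' ∈ List.replicate k.toNat '\t' := h.subset (by simp)
      have := List.eq_of_mem_replicate hm
      simp at this
    · intro h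
      simp at h
  · subst h
    simp only [List.concat_eq_append, ← List.append_assoc]
    rw [pv_singleton_suffix_concat, pv_singleton_suffix_concat]

theorem pv_join_nil (ps : List (List Char)) : PySem.Chars.join [] ps = ps.flatten := by
  show List.intercalate [] ps = ps.flatten
  induction ps with
  | nil => rfl
  | cons p ps ih =>
    cases ps with
    | nil => simp [List.intercalate]
    | cons q qs =>
      simp [List.intercalate] at ih ⊢
      simpa using ih

-- A's loop renders pvRender of the stripped lines
theorem pv_foldA_eq (ls : List (List Char)) : ∀ (n : Int) (acc : List Char),
    (ls.foldl
      (fun (s : Int × List Char) line =>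
        let line := PySem.Chars.strip line
        let indent := if PySem.Chars.endswith line ['}'] then s.1 - 1 else s.1
        let line := PySem.List.pyRepeat ['\t'] indent ++ line
        let indent := if PySem.Chars.endswith line ['{'] then indent + 1 else indent
        (indent, s.2 ++ line ++ ['\n'])) (n, acc)).2 =
      acc ++ pvRender (ls.map PySem.Chars.strip) n := by
  induction ls with
  | nil => intro n acc; simp [pvRender]
  | cons l ls ih =>
    intro n acc
    simp only [List.foldl_cons, List.map_cons, pvRender]
    rw [ih]
    have h1 : (if PySem.Chars.endswith (PySem.Chars.strip l) ['}'] then n - 1 else n) =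
        n - (if PySem.Chars.endswith (PySem.Chars.strip l) ['}'] then 1 else 0) := by
      split_ifs <;> omega
    rw [h1, pv_endswith_tabs]
    have h2 : (if PySem.Chars.endswith (PySem.Chars.strip l) ['{'] then
          n - (if PySem.Chars.endswith (PySem.Chars.strip l) ['}'] then 1 else 0) + 1
        else n - (if PySem.Chars.endswith (PySem.Chars.strip l) ['}'] then 1 else 0)) =
        n + pvDelta (PySem.Chars.strip l) := by
      unfold pvDelta; split_ifs <;> omega
    rw [h2]
    simp

-- B's prefix-sum loop builds pvDepths
theorem pv_depths_eq (ds : List Int) : ∀ (pre : List Int) (n : Int),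
    (ds.foldl (fun (s : List Int × Int) x => (s.1 ++ [s.2], s.2 + x)) (pre, n)).1 =
      pre ++ pvDepths ds n := by
  induction ds with
  | nil => intro pre n; simp [pvDepths]
  | cons d ds ih =>
    intro pre n
    simp only [List.foldl_cons, pvDepths]
    rw [ih]
    simp

-- B's format pass over the tables renders pvRender
theorem pv_pieces_eq (ls : List (List Char)) : ∀ (n : Int),
    ((((pvDepths (ls.map pvDelta) n).zip (ls.map (fun l => PySem.Chars.endswith l ['}']))).zip
        ls).map
      (fun t => PySem.List.pyRepeat ['\t'] (t.1.1 - (if t.1.2 then 1 else 0)) ++ t.2 ++ ['\n'])).flatten =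
      pvRender ls n := by
  induction ls with
  | nil => intro n; simp [pvDepths, pvRender]
  | cons l ls ih =>
    intro n
    simp only [List.map_cons, pvDepths, List.zip_cons_cons, List.flatten_cons, pvRender]
    rw [ih]

-- ===== VERDICT (by name: the statement is the Claim_ definition above) =====
theorem auto_indent_spec : Claim_equal_auto_indent := by
  intro string _
  unfold Spec_auto_indent auto_indent auto_indent_alt
  simp only []
  rw [pv_foldA_eq, pv_join_nil, List.nil_append]
  generalize (PySem.Chars.splitOn string.toList ['\n']).map PySem.Chars.strip = ls
  have hz : ls.zip (ls.map (fun l => PySem.Chars.endswith l ['}'])) =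
      ls.map (fun l => (l, PySem.Chars.endswith l ['}'])) := by
    exact Eq.symm List.map_prod_left_eq_zip
  rw [hz, List.map_map]
  have hδ : ls.map ((fun p => (if PySem.Chars.endswith p.1 ['{'] then (1 : Int) else 0) -
        (if p.2 then 1 else 0)) ∘ (fun l => (l, PySem.Chars.endswith l ['}']))) = ls.map pvDelta := by
    apply List.map_congr_left
    intro x _
    simp [pvDelta]
  rw [hδ, pv_depths_eq, List.nil_append, pv_pieces_eq]
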